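-- pv_equiv track=rewrite | github.com/Callum-M-Halton/70_Flood_Sys | floodsystem/analysis.py | risk_level_from_flood_time
-- ===== SOURCE A (Python) =====
-- def risk_level_from_flood_time(flood_time):
--     """
--     Calculates the level of severity given the flood_time
--     Returns the risk severity (low, medium, high, severe)
--     """
--     flood_time_thresholds = (
--         ( 'severe'   , 0  ),
--         ( 'high'     , 2  ),
--         ( 'moderate' , 5  ),
--         ( 'low '     , 10 ),
--     )
--
--     for threshold_pair in flood_time_thresholds:
--         if flood_time >= threshold_pair[1]:
--             risk_level = threshold_pair[0]
--         else:
--             break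
--     return risk_level
-- ===== SOURCE B (Python) =====
-- def risk_level_from_flood_time(flood_time):
--     """
--     Calculates the level of severity given the flood_time
--     Returns the risk severity (low, medium, high, severe)
--     """
--     if flood_time >= 10:
--         risk_level = 'low '
--     elif flood_time >= 5:
--         risk_level = 'moderate'
--     elif flood_time >= 2:
--         risk_level = 'high'
--     elif flood_time >= 0:
--         risk_level = 'severe'
--     return risk_level
-- ===== Notes on version B (the rewrite author's own statement) =====
-- stated objective: simpler
-- what changed: Replaces the threshold-table plus accumulate-and-break loop with a direct if/elif chain tested in descending order, returning each label immediately without loop state.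
import Mathlib
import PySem

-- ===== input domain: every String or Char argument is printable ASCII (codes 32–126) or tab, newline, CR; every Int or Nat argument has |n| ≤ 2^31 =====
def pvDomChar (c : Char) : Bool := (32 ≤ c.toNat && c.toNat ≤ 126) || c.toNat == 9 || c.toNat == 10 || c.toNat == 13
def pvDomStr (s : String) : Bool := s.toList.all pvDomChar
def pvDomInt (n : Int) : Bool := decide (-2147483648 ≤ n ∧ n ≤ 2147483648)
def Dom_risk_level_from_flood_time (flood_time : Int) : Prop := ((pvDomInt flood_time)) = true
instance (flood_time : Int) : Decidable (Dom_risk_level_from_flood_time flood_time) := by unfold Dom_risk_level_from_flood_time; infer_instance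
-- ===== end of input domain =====

-- B replaces A's threshold table and accumulate-and-break loop by a plain descending if/elif chain (simpler); return values proved equal on Pre_.

-- ===== PORT A =====
-- A's for-loop over the threshold tuple: accumulates the last label whose threshold
-- is met, breaks at the first miss. State is Option String (none = risk_level unbound;
-- Python raises UnboundLocalError there, excluded by Pre_; the port returns "" there).
def riskLoopA (flood_time : Int) : List (String × Int) → Option String → Option String
  | [], acc => acc
  | p :: ps, acc =>
      if flood_time ≥ p.2 then riskLoopA flood_time ps (some p.1) else acc

def risk_level_from_flood_time (flood_time : Int) : String :=
  (riskLoopA flood_time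
    [("severe", 0), ("high", 2), ("moderate", 5), ("low ", 10)] none).getD ""

-- ===== PORT B =====
-- descending if/elif chain; the final else ("", never reached on Pre_) mirrors the
-- UnboundLocalError Python B raises for negative flood_time.
def risk_level_from_flood_time_alt (flood_time : Int) : String :=
  if flood_time ≥ 10 then "low "
  else if flood_time ≥ 5 then "moderate"
  else if flood_time ≥ 2 then "high"
  else if flood_time ≥ 0 then "severe"
  else ""

-- ===== PRECONDITION & SPEC =====
-- Pre_ excludes negative flood_time, where both A and B raise UnboundLocalError (risk_level never assigned).
def Pre_risk_level_from_flood_time (flood_time : Int) : Prop := 0 ≤ flood_time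
instance (flood_time : Int) : Decidable (Pre_risk_level_from_flood_time flood_time) := by
  unfold Pre_risk_level_from_flood_time; infer_instance

def pvWitness_risk_level_from_flood_time : Int := (3)

def Spec_risk_level_from_flood_time (flood_time : Int) (out : String) : Prop := out = risk_level_from_flood_time_alt flood_time
instance (flood_time : Int) (out : String) : Decidable (Spec_risk_level_from_flood_time flood_time out) := by unfold Spec_risk_level_from_flood_time; infer_instance

-- ===== CLAIM (what is proved, stated in full; the proofs are below) =====
def Claim_equal_risk_level_from_flood_time : Prop := ∀ (flood_time : Int), Dom_risk_level_from_flood_time flood_time → Pre_risk_level_from_flood_time flood_time → Spec_risk_level_from_flood_time flood_time (risk_level_from_flood_time flood_time)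

-- ===== LEMMAS AND PROOFS =====

-- ===== VERDICT (by name: the statement is the Claim_ definition above) =====
theorem risk_level_from_flood_time_spec : Claim_equal_risk_level_from_flood_time := by
  intro t _ hpre
  unfold Spec_risk_level_from_flood_time risk_level_from_flood_time risk_level_from_flood_time_alt
  unfold Pre_risk_level_from_flood_time at hpre
  simp only [riskLoopA]
  split_ifs <;> simp_all <;> omega
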